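-- pv_equiv track=rewrite | github.com/iTom34/advent_2023 | advent/day_2.py | possible_game
-- ===== SOURCE A (Python) =====
-- RED_QUANTITY = 12
--
-- GREEN_QUANTITY = 13
--
-- BLUE_QUANTITY = 14
--
-- def possible_game(sets: list) -> bool:
--     """
--     Return true if a game is possible
--     :param sets: a game
--     :return: True if the game is possible
--     """
--     possible = True
--     for a_set in sets:
--         for colour, quantity in a_set:
--             if colour == 'red' and quantity > RED_QUANTITY:
--                 return False
--
--             elif colour == 'green' and quantity > GREEN_QUANTITY:
--                 return False
--
--             elif colour == 'blue' and quantity > BLUE_QUANTITY: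
--                 return False
--
--     return True
-- ===== SOURCE B (Python) =====
-- RED_QUANTITY = 12
--
-- GREEN_QUANTITY = 13
--
-- BLUE_QUANTITY = 14
--
-- def possible_game(sets: list) -> bool:
--     """Aggregate-then-validate: record each colour's maximum, then compare against the limits."""
--     maxima = {}
--     for a_set in sets:
--         for colour, quantity in a_set:
--             maxima[colour] = max(maxima.get(colour, 0), quantity)
--     limits = {'red': RED_QUANTITY, 'green': GREEN_QUANTITY, 'blue': BLUE_QUANTITY}
--     return all(maxima.get(colour, 0) <= limit for colour, limit in limits.items())
-- ===== Notes on version B (the rewrite author's own statement) =====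
-- stated objective: alternative
-- what changed: Replaces A's per-entry early-return scan with an aggregate-then-validate decomposition: one pass builds a dict of each colour's maximum quantity, then a separate pass compares the three colour limits against the recorded maxima.
import Mathlib
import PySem

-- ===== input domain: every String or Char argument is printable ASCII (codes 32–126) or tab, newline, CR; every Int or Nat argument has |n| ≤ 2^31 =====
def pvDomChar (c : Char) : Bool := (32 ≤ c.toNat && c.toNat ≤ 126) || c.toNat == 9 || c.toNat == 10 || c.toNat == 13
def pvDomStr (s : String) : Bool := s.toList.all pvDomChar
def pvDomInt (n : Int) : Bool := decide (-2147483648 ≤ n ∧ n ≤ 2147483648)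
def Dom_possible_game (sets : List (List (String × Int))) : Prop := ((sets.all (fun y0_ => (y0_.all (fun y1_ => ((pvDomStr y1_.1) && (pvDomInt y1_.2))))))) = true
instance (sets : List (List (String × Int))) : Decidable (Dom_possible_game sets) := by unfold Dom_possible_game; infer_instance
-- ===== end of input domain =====

-- B replaces A's per-entry early-return scan by an aggregate-then-validate decomposition
-- (one pass recording each colour's max in a dict, then a separate comparison pass); objective: alternative.

-- ===== PORT A =====
def pgRED : Int := 12
def pgGREEN : Int := 13
def pgBLUE : Int := 14

-- inner `for colour, quantity in a_set` loop with its early returns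
def pgScanSet : List (String × Int) → Bool
  | [] => true
  | (colour, quantity) :: rest =>
    if colour == "red" && decide (quantity > pgRED) then false
    else if colour == "green" && decide (quantity > pgGREEN) then false
    else if colour == "blue" && decide (quantity > pgBLUE) then false
    else pgScanSet rest

def possible_game : List (List (String × Int)) → Bool
  | [] => true
  | a_set :: rest => if pgScanSet a_set then possible_game rest else false

-- ===== PORT B =====
def possible_game_alt (sets : List (List (String × Int))) : Bool :=
  let maxima : PySem.Dict String Int :=
    sets.foldl (fun d a_set =>
      a_set.foldl (fun d p => d.modify p.1 0 (fun v => max v p.2)) d) PySem.Dict.empty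
  let limits : PySem.Dict String Int :=
    ((PySem.Dict.empty.insert "red" pgRED).insert "green" pgGREEN).insert "blue" pgBLUE
  limits.items.all (fun p => decide (maxima.getD p.1 0 ≤ p.2))

-- ===== PRECONDITION & SPEC =====
def Spec_possible_game (sets : List (List (String × Int))) (out : Bool) : Prop := out = possible_game_alt sets
instance (sets : List (List (String × Int))) (out : Bool) : Decidable (Spec_possible_game sets out) := by unfold Spec_possible_game; infer_instance

-- ===== CLAIM (what is proved, stated in full; the proofs are below) =====
def Claim_equal_possible_game : Prop := ∀ (sets : List (List (String × Int))), Dom_possible_game sets → Spec_possible_game sets (possible_game sets)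

-- ===== LEMMAS AND PROOFS =====

-- one pair is within all three limits
def pgGood (p : String × Int) : Prop :=
  (p.1 = "red" → p.2 ≤ pgRED) ∧ (p.1 = "green" → p.2 ≤ pgGREEN) ∧ (p.1 = "blue" → p.2 ≤ pgBLUE)

theorem pgScanSet_eq_true_iff (s : List (String × Int)) :
    pgScanSet s = true ↔ ∀ p ∈ s, pgGood p := by
  induction s with
  | nil => simp [pgScanSet]
  | cons hd tl ih =>
    obtain ⟨c, q⟩ := hd
    simp only [pgScanSet]
    split_ifs with h1 h2 h3 <;>
      simp_all [pgGood, pgRED, pgGREEN, pgBLUE]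

theorem possible_game_eq_true_iff (sets : List (List (String × Int))) :
    possible_game sets = true ↔ ∀ s ∈ sets, ∀ p ∈ s, pgGood p := by
  induction sets with
  | nil => simp [possible_game]
  | cons hd tl ih =>
    simp only [possible_game]
    split_ifs with h
    · rw [pgScanSet_eq_true_iff] at h; simp_all
    · rw [pgScanSet_eq_true_iff] at h; simp_all

-- the maxima fold keeps a colour within L iff it was within L before and every new quantity of that colour is ≤ L
theorem pgFold_getD_le (l : List (String × Int)) (c : String) (L : Int) :
    ∀ d : PySem.Dict String Int,
      ((l.foldl (fun d p => d.modify p.1 0 (fun v => max v p.2)) d).getD c 0 ≤ L ↔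
        d.getD c 0 ≤ L ∧ ∀ p ∈ l, p.1 = c → p.2 ≤ L) := by
  induction l with
  | nil => simp
  | cons hd tl ih =>
    intro d
    simp only [List.foldl_cons, ih, PySem.Dict.getD_modify, List.mem_cons]
    by_cases hc : c = hd.1
    · subst hc
      rw [if_pos rfl]
      constructor
      · rintro ⟨h1, h2⟩
        exact ⟨le_of_max_le_left h1, fun p hp => by
          rcases hp with rfl | hp
          · exact fun _ => le_of_max_le_right h1
          · exact h2 p hp⟩
      · rintro ⟨h1, h2⟩
        exact ⟨max_le h1 (h2 hd (Or.inl rfl) rfl), fun p hp => h2 p (Or.inr hp)⟩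
    · simp only [if_neg hc]
      constructor
      · rintro ⟨h1, h2⟩
        exact ⟨h1, fun p hp => by
          rcases hp with rfl | hp
          · exact fun h => absurd h.symm hc
          · exact h2 p hp⟩
      · rintro ⟨h1, h2⟩
        exact ⟨h1, fun p hp => h2 p (Or.inr hp)⟩

theorem pgMaxima_getD_le (sets : List (List (String × Int))) (c : String) (L : Int) (hL : 0 ≤ L) :
    ((sets.foldl (fun d a_set =>
        a_set.foldl (fun d p => d.modify p.1 0 (fun v => max v p.2)) d) PySem.Dict.empty).getD c 0 ≤ L ↔
      ∀ s ∈ sets, ∀ p ∈ s, p.1 = c → p.2 ≤ L) := by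
  rw [← List.foldl_flatten, pgFold_getD_le]
  simp [PySem.Dict.getD_empty, hL, List.mem_flatten]
  aesop

theorem possible_game_alt_eq_true_iff (sets : List (List (String × Int))) :
    possible_game_alt sets = true ↔ ∀ s ∈ sets, ∀ p ∈ s, pgGood p := by
  unfold possible_game_alt
  simp only [List.all_eq_true]
  rw [show (((PySem.Dict.empty.insert "red" pgRED).insert "green" pgGREEN).insert "blue" pgBLUE :
        PySem.Dict String Int).items = [("red", pgRED), ("green", pgGREEN), ("blue", pgBLUE)] from rfl]
  constructor
  · intro h s hs p hp
    have hr := (pgMaxima_getD_le sets "red" pgRED (by decide)).mp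
      (by simpa using h ("red", pgRED) (by simp))
    have hg := (pgMaxima_getD_le sets "green" pgGREEN (by decide)).mp
      (by simpa using h ("green", pgGREEN) (by simp))
    have hb := (pgMaxima_getD_le sets "blue" pgBLUE (by decide)).mp
      (by simpa using h ("blue", pgBLUE) (by simp))
    exact ⟨hr s hs p hp, hg s hs p hp, hb s hs p hp⟩
  · intro h p hp
    simp only [List.mem_cons, List.not_mem_nil, or_false] at hp
    rcases hp with rfl | rfl | rfl <;>
      · simp only [decide_eq_true_eq]
        rw [pgMaxima_getD_le _ _ _ (by decide)]
        intro s hs q hq hc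
        have := h s hs q hq
        unfold pgGood at this
        simp_all

-- ===== VERDICT (by name: the statement is the Claim_ definition above) =====
theorem possible_game_spec : Claim_equal_possible_game := by
  intro sets _
  unfold Spec_possible_game
  rw [Bool.eq_iff_iff, possible_game_eq_true_iff, possible_game_alt_eq_true_iff]
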